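-- pv_equiv track=rewrite | github.com/xanthics/bdo_node_manager | gen_nodes_greedy.py | allcombo
-- ===== SOURCE A (Python) =====
-- def allcombo(vals, q, mystr, worker_current, worker_max):
-- 	if q:
-- 		for v in vals[q[0]]['distances']:
-- 			if worker_current[v] < worker_max[v]:
-- 				worker_current_copy = worker_current.copy()
-- 				worker_current_copy[v] += 1
-- 				yield from allcombo(vals, q[1:], mystr+[(q[0], v)], worker_current_copy, worker_max)
-- 	else:
-- 		yield mystr
-- ===== SOURCE B (Python) =====
-- def allcombo(vals, q, mystr, worker_current, worker_max):
-- 	# Generate-and-test instead of pruned DFS: build the full Cartesian product of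
-- 	# distance choices, then keep the sequences whose total per-value demand fits the
-- 	# capacities (a prefix-wise capacity check succeeds iff the final counts fit).
-- 	combos = [[]]
-- 	for key in q:
-- 		combos = [c + [v] for c in combos for v in vals[key]['distances']]
-- 	for c in combos:
-- 		if all(worker_current[v] + c.count(v) <= worker_max[v] for v in c):
-- 			yield mystr + list(zip(q, c))
-- ===== Notes on version B (the rewrite author's own statement) =====
-- stated objective: alternative
-- what changed: Replaces A's pruned depth-first recursion carrying a running counter dict by generate-and-test: build the full Cartesian product of distance choices, then filter each complete sequence by the total-count condition worker_current[v] + c.count(v) <= worker_max[v], which is equivalent to A's prefix-wise capacity check and preserves the DFS yield order.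
import Mathlib
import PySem

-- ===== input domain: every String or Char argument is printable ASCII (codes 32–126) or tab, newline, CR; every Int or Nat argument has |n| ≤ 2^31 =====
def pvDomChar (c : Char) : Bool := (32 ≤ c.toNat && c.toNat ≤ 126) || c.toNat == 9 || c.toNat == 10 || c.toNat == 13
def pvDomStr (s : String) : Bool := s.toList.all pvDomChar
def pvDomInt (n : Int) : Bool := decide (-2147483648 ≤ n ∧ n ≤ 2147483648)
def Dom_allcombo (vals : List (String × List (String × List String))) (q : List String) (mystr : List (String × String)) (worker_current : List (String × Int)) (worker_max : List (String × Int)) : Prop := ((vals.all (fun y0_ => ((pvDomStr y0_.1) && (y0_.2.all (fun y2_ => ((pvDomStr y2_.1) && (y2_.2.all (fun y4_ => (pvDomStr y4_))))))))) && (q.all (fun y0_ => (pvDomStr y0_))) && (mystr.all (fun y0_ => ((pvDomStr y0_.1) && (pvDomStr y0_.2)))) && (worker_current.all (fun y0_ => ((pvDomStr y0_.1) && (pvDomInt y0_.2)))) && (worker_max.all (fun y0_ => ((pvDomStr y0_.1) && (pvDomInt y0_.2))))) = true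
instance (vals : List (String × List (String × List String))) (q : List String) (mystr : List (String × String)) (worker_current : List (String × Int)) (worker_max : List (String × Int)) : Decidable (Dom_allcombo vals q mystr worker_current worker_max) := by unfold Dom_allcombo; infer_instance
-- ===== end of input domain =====

-- B replaces A's pruned depth-first recursion (running counter dict) by generate-and-test:
-- the full Cartesian product of distance choices, filtered by a total-count capacity check
-- (objective: alternative algorithm, same yield order since prefix-wise pruning = final-count filter).

-- ===== PORT A =====
-- A's recursion, after converting the three dict arguments to PySem.Dict once at entry.
-- getD with a default is exact here because Pre_ guarantees the keys are present (Python raises KeyError otherwise).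
def allcomboA (vals : PySem.Dict String (PySem.Dict String (List String))) (wm : PySem.Dict String Int) : List String → List (String × String) → PySem.Dict String Int → List (List (String × String))
  | [], mystr, _ => [mystr]
  | k :: t, mystr, wc =>
    ((vals.getD k PySem.Dict.empty).getD "distances" []).foldl
      (fun acc v =>
        if wc.getD v 0 < wm.getD v 0 then
          acc ++ allcomboA vals wm t (mystr ++ [(k, v)]) (wc.modify v 0 (· + 1))
        else acc) []

def allcombo (vals : List (String × List (String × List String))) (q : List String) (mystr : List (String × String)) (worker_current : List (String × Int)) (worker_max : List (String × Int)) : List (List (String × String)) :=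
  allcomboA (PySem.Dict.ofList (vals.map (fun p => (p.1, PySem.Dict.ofList p.2)))) (PySem.Dict.ofList worker_max) q mystr (PySem.Dict.ofList worker_current)

-- ===== PORT B =====
-- Source B: combos = [[]]; for key in q: combos = [c + [v] for c in combos for v in vals[key]['distances']];
-- then yield mystr + list(zip(q, c)) for each c whose total counts fit the capacities.
def allcombo_alt (vals : List (String × List (String × List String))) (q : List String) (mystr : List (String × String)) (worker_current : List (String × Int)) (worker_max : List (String × Int)) : List (List (String × String)) :=
  let valsD := PySem.Dict.ofList (vals.map (fun p => (p.1, PySem.Dict.ofList p.2)))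
  let wcD := PySem.Dict.ofList worker_current
  let wmD := PySem.Dict.ofList worker_max
  let combos := q.foldl
    (fun cs k => cs.flatMap (fun c => ((valsD.getD k PySem.Dict.empty).getD "distances" []).map (fun v => c ++ [v])))
    [([] : List String)]
  combos.filterMap (fun c =>
    if c.all (fun v => wcD.getD v 0 + (c.count v : Int) ≤ wmD.getD v 0) then
      some (mystr ++ q.zip c)
    else none)

-- ===== PRECONDITION & SPEC =====
-- Pre_ excludes the inputs on which Python A raises KeyError (a key of q missing from vals, a 'distances'
-- key missing, or a distance value missing from worker_current/worker_max). It is slightly narrower than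
-- A's exact return domain: A also returns (an empty/partial yield list) when such a missing key sits only on
-- branches that capacity pruning never reaches; see the cite in claim.json.
def Pre_allcombo (vals : List (String × List (String × List String))) (q : List String) (mystr : List (String × String)) (worker_current : List (String × Int)) (worker_max : List (String × Int)) : Prop :=
  ∀ k ∈ q,
    (PySem.Dict.ofList (vals.map (fun p => (p.1, PySem.Dict.ofList p.2)))).contains k = true ∧
    ((PySem.Dict.ofList (vals.map (fun p => (p.1, PySem.Dict.ofList p.2)))).getD k PySem.Dict.empty).contains "distances" = true ∧
    ∀ v ∈ ((PySem.Dict.ofList (vals.map (fun p => (p.1, PySem.Dict.ofList p.2)))).getD k PySem.Dict.empty).getD "distances" [],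
      (PySem.Dict.ofList worker_current).contains v = true ∧ (PySem.Dict.ofList worker_max).contains v = true
instance (vals : List (String × List (String × List String))) (q : List String) (mystr : List (String × String)) (worker_current : List (String × Int)) (worker_max : List (String × Int)) : Decidable (Pre_allcombo vals q mystr worker_current worker_max) := by unfold Pre_allcombo; infer_instance

def pvWitness_allcombo : (List (String × List (String × List String))) × List String × (List (String × String)) × (List (String × Int)) × (List (String × Int)) :=
  ([("a", [("distances", ["x", "y"])]), ("b", [("distances", ["y"])])], ["a", "b"], [], [("x", 0), ("y", 0)], [("x", 1), ("y", 2)])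

def Spec_allcombo (vals : List (String × List (String × List String))) (q : List String) (mystr : List (String × String)) (worker_current : List (String × Int)) (worker_max : List (String × Int)) (out : List (List (String × String))) : Prop := out = allcombo_alt vals q mystr worker_current worker_max
instance (vals : List (String × List (String × List String))) (q : List String) (mystr : List (String × String)) (worker_current : List (String × Int)) (worker_max : List (String × Int)) (out : List (List (String × String))) : Decidable (Spec_allcombo vals q mystr worker_current worker_max out) := by unfold Spec_allcombo; infer_instance

-- ===== CLAIM =====
def Claim_equal_allcombo : Prop := ∀ (vals : List (String × List (String × List String))) (q : List String) (mystr : List (String × String)) (worker_current : List (String × Int)) (worker_max : List (String × Int)), Dom_allcombo vals q mystr worker_current worker_max → Pre_allcombo vals q mystr worker_current worker_max → Spec_allcombo vals q mystr worker_current worker_max (allcombo vals q mystr worker_current worker_max)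

-- ===== LEMMAS AND PROOFS =====

-- the right-nested Cartesian product of the distance lists along q
def prodR (vals : PySem.Dict String (PySem.Dict String (List String))) : List String → List (List String)
  | [] => [[]]
  | k :: t => ((vals.getD k PySem.Dict.empty).getD "distances" []).flatMap (fun v => (prodR vals t).map (v :: ·))

-- the total-count capacity test of Source B
def okB (wc wm : PySem.Dict String Int) (c : List String) : Bool :=
  c.all (fun v => wc.getD v 0 + (c.count v : Int) ≤ wm.getD v 0)

-- Source B's left fold of product levels computes the right-nested product
theorem foldl_prod (vals : PySem.Dict String (PySem.Dict String (List String))) (q : List String) (cs : List (List String)) :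
    q.foldl (fun cs k => cs.flatMap (fun c => ((vals.getD k PySem.Dict.empty).getD "distances" []).map (fun v => c ++ [v]))) cs
      = cs.flatMap (fun c => (prodR vals q).map (fun r => c ++ r)) := by
  induction q generalizing cs with
  | nil => simp [prodR]
  | cons k t ih =>
    simp only [List.foldl_cons, ih, prodR]
    simp [List.flatMap_assoc, List.map_flatMap, List.flatMap_map, Function.comp_def]

-- 'for x: if c x: out.extend(g x)' as a flatMap
theorem foldl_if_append_eq_flatMap {α β : Type} (l : List α) (c : α → Prop) [DecidablePred c] (g : α → List β) (acc : List β) :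
    l.foldl (fun acc v => if c v then acc ++ g v else acc) acc
      = acc ++ l.flatMap (fun v => if c v then g v else []) := by
  induction l generalizing acc with
  | nil => simp
  | cons x xs ih =>
    simp only [List.foldl_cons, List.flatMap_cons, ih]
    split <;> simp

-- A's cons case as a flatMap
theorem allcomboA_cons (vals : PySem.Dict String (PySem.Dict String (List String))) (wm : PySem.Dict String Int) (k : String) (t : List String) (mystr : List (String × String)) (wc : PySem.Dict String Int) :
    allcomboA vals wm (k :: t) mystr wc
      = ((vals.getD k PySem.Dict.empty).getD "distances" []).flatMap (fun v =>
          if wc.getD v 0 < wm.getD v 0 then allcomboA vals wm t (mystr ++ [(k, v)]) (wc.modify v 0 (· + 1)) else []) := by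
  show ((vals.getD k PySem.Dict.empty).getD "distances" []).foldl _ [] = _
  rw [foldl_if_append_eq_flatMap, List.nil_append]

-- the crux: the total-count test on v :: c is the step test on v plus the total-count test after incrementing v
theorem okB_cons (wc wm : PySem.Dict String Int) (v : String) (c : List String) :
    okB wc wm (v :: c) = true ↔ (wc.getD v 0 < wm.getD v 0 ∧ okB (wc.modify v 0 (· + 1)) wm c = true) := by
  simp only [okB, List.all_eq_true, List.mem_cons, decide_eq_true_eq]
  constructor
  · intro h
    have hv := h v (Or.inl rfl)
    simp only [List.count_cons] at hv
    simp only [beq_self_eq_true] at hv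
    push_cast at hv
    refine ⟨by omega, fun x hx => ?_⟩
    have hx' := h x (Or.inr hx)
    simp only [List.count_cons, beq_iff_eq] at hx'
    rw [PySem.Dict.getD_modify]
    rcases eq_or_ne x v with rfl | hxv
    · rw [if_pos rfl]
      push_cast at hx' ⊢
      omega
    · simp only [hxv, Ne.symm hxv, if_false] at hx' ⊢
      push_cast at hx' ⊢
      omega
  · rintro ⟨h1, h2⟩ x hx
    rcases hx with hx | hx
    · subst hx
      simp only [List.count_cons, beq_self_eq_true]
      by_cases hv : x ∈ c
      · have h3 := h2 x hv
        rw [PySem.Dict.getD_modify, if_pos rfl] at h3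
        push_cast at h3 ⊢
        omega
      · rw [List.count_eq_zero_of_not_mem hv]
        push_cast
        omega
    · have h3 := h2 x hx
      rw [PySem.Dict.getD_modify] at h3
      simp only [List.count_cons, beq_iff_eq]
      rcases eq_or_ne x v with rfl | hxv
      · rw [if_pos rfl] at h3
        rw [if_pos rfl]
        push_cast at h3 ⊢
        omega
      · rw [if_neg hxv] at h3
        simp only [Ne.symm hxv, if_false]
        push_cast at h3 ⊢
        omega

-- A's pruned recursion equals the filtered right-nested product
theorem allcomboA_eq_filterMap (vals : PySem.Dict String (PySem.Dict String (List String))) (wm : PySem.Dict String Int) (q : List String) (mystr : List (String × String)) (wc : PySem.Dict String Int) :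
    allcomboA vals wm q mystr wc
      = (prodR vals q).filterMap (fun c => if okB wc wm c then some (mystr ++ q.zip c) else none) := by
  induction q generalizing mystr wc with
  | nil => simp [allcomboA, prodR, okB]
  | cons k t ih =>
    rw [allcomboA_cons, prodR]
    rw [List.filterMap_flatMap]
    refine List.flatMap_congr (fun v _ => ?_)
    rw [List.filterMap_map]
    by_cases hv : wc.getD v 0 < wm.getD v 0
    · rw [if_pos hv, ih]
      refine List.filterMap_congr (fun c _ => ?_)
      simp only [Function.comp_apply]
      by_cases hc : okB (wc.modify v 0 (· + 1)) wm c = true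
      · rw [if_pos hc, if_pos ((okB_cons wc wm v c).mpr ⟨hv, hc⟩)]
        simp [List.zip]
      · rw [if_neg hc, if_neg (fun h => hc ((okB_cons wc wm v c).mp h).2)]
    · rw [if_neg hv]
      symm
      rw [List.filterMap_eq_nil_iff]
      intro c _
      simp only [Function.comp_apply]
      rw [if_neg (fun h => hv ((okB_cons wc wm v c).mp h).1)]

-- ===== VERDICT =====
theorem allcombo_spec : Claim_equal_allcombo := by
  intro vals q mystr worker_current worker_max _ _
  show allcombo vals q mystr worker_current worker_max = allcombo_alt vals q mystr worker_current worker_max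
  unfold allcombo allcombo_alt
  dsimp only
  rw [foldl_prod, allcomboA_eq_filterMap]
  simp [okB]
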